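-- pv_equiv track=rewrite | github.com/tahmid-saj/data-structures-algorithms | leetcode/python/0316_remove_duplicate_letters.py | monotonicStack
-- ===== SOURCE A (Python) =====
-- def monotonicStack(s):
--     # set to record elements already added onto stack, lastOccurence to record last index of s[i], monotonic inc (a b c) stack
--     seen, stk, lastOccurence = set(), [], {}
--
--     for i in range(len(s)): lastOccurence[s[i]] = i
--
--     for i in range(len(s)):
--         if s[i] not in seen:
--             while stk and stk[-1][0] >= s[i]:
--                 if i < lastOccurence[stk[-1][0]]:
--                     c, _ = stk.pop()
--                     if c in seen: seen.remove(c)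
--                 else: break
--             if s[i] not in seen:
--                 stk.append((s[i], i))
--                 seen.add(s[i])
--
--     res = ""
--     while stk: res += stk.pop()[0]
--     return res[::-1]
-- ===== SOURCE B (Python) =====
-- def monotonicStack(s):
--     # Recursive greedy: the first output letter is the smallest char of the
--     # prefix ending at the first position whose char never occurs again;
--     # emit it and recurse on the remainder with every copy of it removed.
--     if not s:
--         return ""
--     count = {}
--     for ch in s:
--         count[ch] = count.get(ch, 0) + 1
--     pos = 0
--     for i, ch in enumerate(s):
--         if ch < s[pos]:
--             pos = i
--         count[ch] -= 1
--         if count[ch] == 0: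
--             break
--     c = s[pos]
--     rest = "".join(ch for ch in s[pos + 1:] if ch != c)
--     return c + monotonicStack(rest)
-- ===== Notes on version B (the rewrite author's own statement) =====
-- stated objective: alternative
-- what changed: Replaces the single-pass monotonic stack (with seen-set and last-occurrence index table) by the recursive greedy: count occurrences, pick the smallest char of the prefix ending where some count first hits zero, emit it and recurse on the suffix with that char removed.
import Mathlib
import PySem

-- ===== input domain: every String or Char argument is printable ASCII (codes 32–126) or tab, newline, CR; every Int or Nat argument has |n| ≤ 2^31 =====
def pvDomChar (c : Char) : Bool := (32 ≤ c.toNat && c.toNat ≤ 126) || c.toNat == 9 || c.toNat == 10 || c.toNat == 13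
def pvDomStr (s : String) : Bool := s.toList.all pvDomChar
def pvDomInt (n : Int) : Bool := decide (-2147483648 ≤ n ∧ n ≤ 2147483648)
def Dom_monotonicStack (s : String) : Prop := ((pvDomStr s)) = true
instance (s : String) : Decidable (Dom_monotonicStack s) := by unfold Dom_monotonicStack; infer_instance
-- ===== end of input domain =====

-- B replaces A's monotonic stack by the recursive greedy choice of the first letter;
-- same return value on every input, similar cost (objective: alternative algorithm).

-- ===== PORT A =====
-- Transliteration of A.  The stack is held TOP-FIRST (Python's stk[-1] is the
-- head, append is cons, pop is tail).  s[i] for 0 ≤ i < len(s) is ported as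
-- s.toList.getD i ' ' (every access made by A is in range).

-- for i in range(len(s)): lastOccurence[s[i]] = i
def pvLastOccA (cs : List Char) : PySem.Dict Char Nat :=
  (List.range cs.length).foldl (fun d i => d.insert (cs.getD i ' ') i) PySem.Dict.empty

-- the inner while loop: while stk and stk[-1][0] >= s[i]: if i < lastOccurence[...]:
-- pop (and 'if c in seen: seen.remove(c)' — remove of a present element is discard) else break
def pvPopA (seen : PySem.Set Char) (stk : List (Char × Nat)) (c : Char) (i : Nat)
    (lastOcc : PySem.Dict Char Nat) : PySem.Set Char × List (Char × Nat) :=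
  match stk with
  | [] => (seen, [])
  | (x, j) :: rest =>
    if c ≤ x then
      if i < lastOcc.getD x 0 then
        pvPopA (if x ∈ seen then PySem.Set.discard seen x else seen) rest c i lastOcc
      else (seen, (x, j) :: rest)
    else (seen, (x, j) :: rest)

-- the outer 'for i in range(len(s))' loop over the index list
def pvLoopA (cs : List Char) (lastOcc : PySem.Dict Char Nat) :
    List Nat → PySem.Set Char × List (Char × Nat) → PySem.Set Char × List (Char × Nat)
  | [], st => st
  | i :: is, (seen, stk) =>
    if cs.getD i ' ' ∈ seen then pvLoopA cs lastOcc is (seen, stk)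
    else
      let st1 := pvPopA seen stk (cs.getD i ' ') i lastOcc
      if cs.getD i ' ' ∈ st1.1 then pvLoopA cs lastOcc is st1
      else pvLoopA cs lastOcc is
        (PySem.Set.add st1.1 (cs.getD i ' '), (cs.getD i ' ', i) :: st1.2)

-- res = ""; while stk: res += stk.pop()[0]   (res kept as its character list)
def pvResA : List (Char × Nat) → List Char → List Char
  | [], res => res
  | (x, _) :: rest, res => pvResA rest (res ++ [x])

def monotonicStack (s : String) : String :=
  let cs := s.toList
  let st := pvLoopA cs (pvLastOccA cs) (List.range cs.length) (PySem.Set.empty, [])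
  -- return res[::-1]   (s[::-1] is reverse: PySem.Str.slice?_none_none_neg_one)
  String.ofList (pvResA st.2 []).reverse

-- ===== PORT B =====
-- Transliteration of Source B on the string's character list.

-- count[ch] = count.get(ch, 0) + 1
def pvCountB (cs : List Char) : PySem.Dict Char Int :=
  cs.foldl (fun d ch => d.insert ch (d.getD ch 0 + 1)) PySem.Dict.empty

-- for i, ch in enumerate(s): indexed traversal of the remaining characters;
-- count[ch] -= 1 reads an always-present key; break as soon as it reaches 0
def pvSelB (cs : List Char) : List Char → Nat → PySem.Dict Char Int → Nat → Nat
  | [], _, _, pos => pos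
  | ch :: rem, i, count, pos =>
    let pos1 := if ch < cs.getD pos ' ' then i else pos
    let count1 := count.insert ch (count.getD ch 0 - 1)
    if count1.getD ch 0 == 0 then pos1 else pvSelB cs rem (i + 1) count1 pos1

def pvGoB : List Char → List Char
  | [] => []
  | c0 :: cs' =>
    let pos := pvSelB (c0 :: cs') (c0 :: cs') 0 (pvCountB (c0 :: cs')) 0
    let c := (c0 :: cs').getD pos ' '
    -- rest = "".join(ch for ch in s[pos+1:] if ch != c): a slice from a
    -- nonnegative index is List.drop, the comprehension is filter
    c :: pvGoB (((c0 :: cs').drop (pos + 1)).filter (fun x => x ≠ c))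
termination_by cs => cs.length
decreasing_by
  refine lt_of_le_of_lt (List.length_filter_le _ _) ?_
  simp only [List.length_drop, List.length_cons]
  omega

def monotonicStack_alt (s : String) : String := String.ofList (pvGoB s.toList)

-- ===== PRECONDITION & SPEC =====
def Spec_monotonicStack (s : String) (out : String) : Prop := out = monotonicStack_alt s
instance (s : String) (out : String) : Decidable (Spec_monotonicStack s out) := by unfold Spec_monotonicStack; infer_instance

-- ===== CLAIM (what is proved, stated in full; the proofs are below) =====
def Claim_equal_monotonicStack : Prop := ∀ (s : String), Dom_monotonicStack s → Spec_monotonicStack s (monotonicStack s)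

-- ===== LEMMAS AND PROOFS =====

-- ---- A clean model of A's stack run (characters only, rest-of-input for the
-- ---- last-occurrence test), used only by the proofs ----

def popM : List Char → Char → List Char → List Char
  | [], _, _ => []
  | x :: xs, c, rest => if c ≤ x ∧ x ∈ rest then popM xs c rest else x :: xs

def stepM (stk : List Char) (c : Char) (rest : List Char) : List Char :=
  if c ∈ stk then stk else c :: popM stk c rest

def runM : List Char → List Char → List Char
  | stk, [] => stk
  | stk, c :: r => runM (stepM stk c r) r

-- state after processing a prefix u when v still follows
def runP (stk : List Char) : List Char → List Char → List Char
  | [], _ => stk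
  | d :: u, v => runP (stepM stk d (u ++ v)) u v

-- first index whose character never occurs again
def iStar : List Char → Nat
  | [] => 0
  | x :: r => if x ∈ r then iStar r + 1 else 0

-- "no character smaller than c occurs in r with a c strictly after it"
def NoDang (c : Char) : List Char → Prop
  | [] => True
  | d :: r => (c ∈ r → c ≤ d) ∧ NoDang c r

def Good (c : Char) (r : List Char) : Prop :=
  NoDang c r ∨ ∃ u e v, r = u ++ e :: v ∧ (∀ x ∈ u, c ≤ x) ∧ c < e ∧ e ∉ v

-- the invariant protecting the settled bottom letter c
def Vc (c : Char) (M r : List Char) : Prop :=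
  c ∈ r → (∃ e ∈ M, e ∉ r) ∨ Good c r

-- ---- basic facts ----

theorem getD_drop' (l : List Char) (n m : Nat) (d : Char) :
    (l.drop n).getD m d = l.getD (n + m) d := by
  simp [List.getD_eq_getElem?_getD, List.getElem?_drop]

theorem getD_cons_succ' (a : Char) (l : List Char) (n : Nat) (d : Char) :
    (a :: l).getD (n + 1) d = l.getD n d := rfl

theorem iStar_lt_length (t : List Char) (h : t ≠ []) : iStar t < t.length := by
  induction t with
  | nil => simp at h
  | cons x r ih =>
    by_cases hx : x ∈ r
    · have hr : r ≠ [] := by rintro rfl; simp at hx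
      have := ih hr
      simp only [iStar, if_pos hx, List.length_cons]
      omega
    · simp [iStar, hx]

theorem iStar_mem (t : List Char) : ∀ j < iStar t, t.getD j ' ' ∈ t.drop (j + 1) := by
  induction t with
  | nil => intro j hj; simp [iStar] at hj
  | cons x r ih =>
    intro j hj
    by_cases hx : x ∈ r
    · simp only [iStar, if_pos hx] at hj
      cases j with
      | zero => simpa using hx
      | succ j' =>
        have := ih j' (by omega)
        simpa [getD_cons_succ'] using this
    · simp [iStar, hx] at hj

theorem iStar_not_mem (t : List Char) (h : t ≠ []) :
    t.getD (iStar t) ' ' ∉ t.drop (iStar t + 1) := by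
  induction t with
  | nil => simp at h
  | cons x r ih =>
    by_cases hx : x ∈ r
    · have hr : r ≠ [] := by rintro rfl; simp at hx
      have := ih hr
      simpa [iStar, hx, getD_cons_succ'] using this
    · simpa [iStar, hx] using hx

theorem iStar_le (t : List Char) (j : Nat) (hj : j < t.length)
    (h : t.getD j ' ' ∉ t.drop (j + 1)) : iStar t ≤ j := by
  by_contra hlt
  exact h (iStar_mem t j (by omega))

-- every element has a last occurrence
theorem last_occ_exists (t : List Char) (x : Char) (hx : x ∈ t) :
    ∃ ℓ, ℓ < t.length ∧ t.getD ℓ ' ' = x ∧ x ∉ t.drop (ℓ + 1) := by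
  induction t with
  | nil => simp at hx
  | cons a r ih =>
    by_cases hr : x ∈ r
    · obtain ⟨ℓ, h1, h2, h3⟩ := ih hr
      exact ⟨ℓ + 1, by simp; omega, by simpa [getD_cons_succ'] using h2, by simpa using h3⟩
    · have hax : x = a := by
        rw [List.mem_cons] at hx
        rcases hx with h | h
        · exact h
        · exact absurd h hr
      exact ⟨0, by simp, by simp [hax], by simpa using hr⟩

theorem mem_drop_of_getD (t : List Char) (k ℓ : Nat) (hℓ : ℓ < t.length) (hk : k ≤ ℓ) :
    t.getD ℓ ' ' ∈ t.drop k := by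
  have h1 : (t.drop k).getD (ℓ - k) ' ' = t.getD ℓ ' ' := by
    rw [getD_drop']; congr 1; omega
  have h2 : ℓ - k < (t.drop k).length := by simp [List.length_drop]; omega
  rw [← h1, List.getD_eq_getElem _ _ h2]
  exact List.getElem_mem h2

-- ---- popM / stepM / runP structural facts ----

theorem popM_subset (stk : List Char) (c : Char) (rest : List Char) :
    ∀ x ∈ popM stk c rest, x ∈ stk := by
  induction stk with
  | nil => simp [popM]
  | cons a l ih =>
    intro x hx
    by_cases h : c ≤ a ∧ a ∈ rest
    · simp only [popM, if_pos h] at hx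
      exact List.mem_cons_of_mem _ (ih x hx)
    · simpa [popM, if_neg h] using hx

theorem popM_all (stk : List Char) (c : Char) (rest : List Char)
    (h : ∀ x ∈ stk, c ≤ x ∧ x ∈ rest) : popM stk c rest = [] := by
  induction stk with
  | nil => rfl
  | cons a l ih =>
    have ha := h a (List.mem_cons_self ..)
    simp only [popM, if_pos ha]
    exact ih (fun x hx => h x (List.mem_cons_of_mem _ hx))

theorem popM_mem_of_blocked (stk : List Char) (c : Char) (rest : List Char) (x : Char)
    (hx : x ∈ stk) (hbl : ¬(c ≤ x ∧ x ∈ rest)) : x ∈ popM stk c rest := by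
  induction stk with
  | nil => simp at hx
  | cons a l ih =>
    by_cases h : c ≤ a ∧ a ∈ rest
    · simp only [popM, if_pos h]
      rw [List.mem_cons] at hx
      rcases hx with h' | h'
      · subst h'; exact absurd h hbl
      · exact ih h'
    · simpa [popM, if_neg h] using hx

theorem stepM_subset (stk : List Char) (c : Char) (rest : List Char) :
    ∀ x ∈ stepM stk c rest, x = c ∨ x ∈ stk := by
  intro x hx
  unfold stepM at hx
  split_ifs at hx with h
  · exact Or.inr hx
  · rw [List.mem_cons] at hx
    rcases hx with h' | h'
    · exact Or.inl h'
    · exact Or.inr (popM_subset _ _ _ _ h')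

theorem runM_split (u v stk : List Char) : runM stk (u ++ v) = runM (runP stk u v) v := by
  induction u generalizing stk with
  | nil => rfl
  | cons d u' ih => simpa [runM, runP] using ih (stepM stk d (u' ++ v))

theorem runP_subset (u v stk : List Char) :
    ∀ x ∈ runP stk u v, x ∈ stk ∨ x ∈ u := by
  induction u generalizing stk with
  | nil => intro x hx; exact Or.inl hx
  | cons d u' ih =>
    intro x hx
    rcases ih (stepM stk d (u' ++ v)) x hx with h | h
    · rcases stepM_subset _ _ _ _ h with h' | h'
      · exact Or.inr (by simp [h'])
      · exact Or.inl h'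
    · exact Or.inr (List.mem_cons_of_mem _ h)

-- ---- the protected-bottom lemma ----

theorem good_step (c d : Char) (r : List Char) (h : Good c (d :: r)) :
    (c < d ∧ d ∉ r) ∨ Good c r := by
  rcases h with h | ⟨u, e, v, heq, hu, hce, hev⟩
  · exact Or.inr (Or.inl h.2)
  · cases u with
    | nil =>
      simp only [List.nil_append, List.cons.injEq] at heq
      obtain ⟨h1, h2⟩ := heq
      subst h1; subst h2
      exact Or.inl ⟨hce, hev⟩
    | cons x u' =>
      simp only [List.cons_append, List.cons.injEq] at heq
      exact Or.inr (Or.inr ⟨u', e, v, heq.2,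
        fun y hy => hu y (List.mem_cons_of_mem _ hy), hce, hev⟩)

theorem good_le (c d : Char) (r : List Char) (h : Good c (d :: r)) (hc : c ∈ r) : c ≤ d := by
  rcases h with h | ⟨u, e, v, heq, hu, hce, hev⟩
  · exact h.1 hc
  · cases u with
    | nil =>
      simp only [List.nil_append, List.cons.injEq] at heq
      exact heq.1 ▸ le_of_lt hce
    | cons x u' =>
      simp only [List.cons_append, List.cons.injEq] at heq
      exact heq.1 ▸ hu x (List.mem_cons_self ..)

theorem popM_protected (M : List Char) (c d : Char) (r : List Char) (hcM : c ∉ M)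
    (h : ¬(d ≤ c ∧ c ∈ r) ∨ ∃ x ∈ M, ¬(d ≤ x ∧ x ∈ r)) :
    popM (M ++ [c]) d r = popM M d (r.filter (fun y => y ≠ c)) ++ [c] := by
  induction M with
  | nil =>
    have hblk : ¬(d ≤ c ∧ c ∈ r) := by
      rcases h with h | ⟨x, hx, _⟩
      · exact h
      · simp at hx
    simp [popM, if_neg hblk]
  | cons a M' ih =>
    have hac : a ≠ c := fun hh => hcM (by simp [hh])
    have hmemiff : (a ∈ r.filter (fun y => y ≠ c)) = (a ∈ r) := by
      simp [List.mem_filter, hac]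
    by_cases hcond : d ≤ a ∧ a ∈ r
    · have hcond' : d ≤ a ∧ a ∈ r.filter (fun y => y ≠ c) := ⟨hcond.1, by rw [hmemiff]; exact hcond.2⟩
      simp only [List.cons_append, popM, if_pos hcond, if_pos hcond']
      refine ih (fun hh => hcM (List.mem_cons_of_mem _ hh)) ?_
      rcases h with h | ⟨x, hx, hblk⟩
      · exact Or.inl h
      · rw [List.mem_cons] at hx
        rcases hx with rfl | hx
        · exact absurd hcond hblk
        · exact Or.inr ⟨x, hx, hblk⟩
    · have hcond' : ¬(d ≤ a ∧ a ∈ r.filter (fun y => y ≠ c)) := by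
        rw [hmemiff]; exact hcond
      simp only [List.cons_append, popM]
      rw [if_neg hcond, if_neg hcond']
      rfl

theorem runM_protected (c : Char) (r : List Char) : ∀ M, c ∉ M → Vc c M r →
    runM (M ++ [c]) r = runM M (r.filter (fun y => y ≠ c)) ++ [c] := by
  induction r with
  | nil => intro M _ _; rfl
  | cons d r' ih =>
    intro M hcM hV
    by_cases hdc : d = c
    · subst hdc
      have hstep : stepM (M ++ [d]) d r' = M ++ [d] := by
        unfold stepM; rw [if_pos (by simp)]
      have hV' : Vc d M r' := by
        intro hc
        rcases hV (List.mem_cons_self ..) with ⟨e, heM, her⟩ | hg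
        · exact Or.inl ⟨e, heM, fun hh => her (List.mem_cons_of_mem _ hh)⟩
        · rcases good_step d d r' hg with ⟨hlt, _⟩ | hg'
          · exact absurd hlt (lt_irrefl d)
          · exact Or.inr hg'
      have hfil : (d :: r').filter (fun y => y ≠ d) = r'.filter (fun y => y ≠ d) := by
        rw [List.filter_cons_of_neg (by simp)]
      calc runM (M ++ [d]) (d :: r')
          = runM (M ++ [d]) r' := by
            show runM (stepM (M ++ [d]) d r') r' = _
            rw [hstep]
        _ = runM M (r'.filter (fun y => y ≠ d)) ++ [d] := ih M hcM hV'
        _ = runM M ((d :: r').filter (fun y => y ≠ d)) ++ [d] := by rw [hfil]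
    · have hVmem : c ∈ d :: r' → (∃ e ∈ M, e ∉ d :: r') ∨ Good c (d :: r') := hV
      by_cases hdM : d ∈ M
      · have hstepL : stepM (M ++ [c]) d r' = M ++ [c] := by
          unfold stepM; rw [if_pos (by simp [hdM])]
        have hstepR : stepM M d (r'.filter (fun y => y ≠ c)) = M := by
          unfold stepM; rw [if_pos hdM]
        have hV' : Vc c M r' := by
          intro hc
          rcases hV (List.mem_cons_of_mem _ hc) with ⟨e, heM, her⟩ | hg
          · exact Or.inl ⟨e, heM, fun hh => her (List.mem_cons_of_mem _ hh)⟩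
          · rcases good_step c d r' hg with ⟨_, hdr⟩ | hg'
            · exact Or.inl ⟨d, hdM, hdr⟩
            · exact Or.inr hg'
        have hfil : (d :: r').filter (fun y => y ≠ c) = d :: r'.filter (fun y => y ≠ c) := by
          rw [List.filter_cons_of_pos (by simpa using hdc)]
        calc runM (M ++ [c]) (d :: r')
            = runM (M ++ [c]) r' := by
              show runM (stepM (M ++ [c]) d r') r' = _
              rw [hstepL]
          _ = runM M (r'.filter (fun y => y ≠ c)) ++ [c] := ih M hcM hV'
          _ = runM M ((d :: r').filter (fun y => y ≠ c)) ++ [c] := by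
              rw [hfil]
              show _ = runM (stepM M d (r'.filter (fun y => y ≠ c))) (r'.filter (fun y => y ≠ c)) ++ [c]
              rw [hstepR]
      · -- push case
        have hpm : ¬(d ≤ c ∧ c ∈ r') ∨ ∃ x ∈ M, ¬(d ≤ x ∧ x ∈ r') := by
          by_cases hcr' : c ∈ r'
          · rcases hV (List.mem_cons_of_mem _ hcr') with ⟨e, heM, her⟩ | hg
            · exact Or.inr ⟨e, heM, fun hh => her (List.mem_cons_of_mem _ hh.2)⟩
            · have := good_le c d r' hg hcr'
              exact Or.inl (fun hh => hdc (le_antisymm this hh.1).symm)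
          · exact Or.inl (fun hh => hcr' hh.2)
        have hpop := popM_protected M c d r' hcM hpm
        have hstepL : stepM (M ++ [c]) d r' =
            (d :: popM M d (r'.filter (fun y => y ≠ c))) ++ [c] := by
          unfold stepM
          rw [if_neg (by simp [hdM, hdc]), hpop]
          rfl
        have hstepR : stepM M d (r'.filter (fun y => y ≠ c)) =
            d :: popM M d (r'.filter (fun y => y ≠ c)) := by
          unfold stepM; rw [if_neg hdM]
        set Q := popM M d (r'.filter (fun y => y ≠ c)) with hQ
        have hQsub : ∀ x ∈ Q, x ∈ M := by
          intro x hx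
          have := popM_subset M d (r'.filter (fun y => y ≠ c)) x hx
          exact this
        have hcQ : c ∉ d :: Q := by
          intro hh
          rw [List.mem_cons] at hh
          rcases hh with hh | hh
          · exact hdc hh.symm
          · exact hcM (hQsub c hh)
        have hV' : Vc c (d :: Q) r' := by
          intro hc
          rcases hV (List.mem_cons_of_mem _ hc) with ⟨e, heM, her⟩ | hg
          · have her' : e ∉ r' := fun hh => her (List.mem_cons_of_mem _ hh)
            have heQ : e ∈ Q := by
              apply popM_mem_of_blocked M d _ e heM
              intro hh
              have h2 := hh.2
              rw [List.mem_filter] at h2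
              exact her' (by simpa using h2.1)
            exact Or.inl ⟨e, List.mem_cons_of_mem _ heQ, her'⟩
          · rcases good_step c d r' hg with ⟨_, hdr⟩ | hg'
            · exact Or.inl ⟨d, List.mem_cons_self .., hdr⟩
            · exact Or.inr hg'
        have := ih (d :: Q) hcQ hV'
        have hfil : (d :: r').filter (fun y => y ≠ c) = d :: r'.filter (fun y => y ≠ c) := by
          rw [List.filter_cons_of_pos (by simpa using hdc)]
        calc runM (M ++ [c]) (d :: r')
            = runM ((d :: Q) ++ [c]) r' := by
              show runM (stepM (M ++ [c]) d r') r' = _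
              rw [hstepL]
          _ = runM (d :: Q) (r'.filter (fun y => y ≠ c)) ++ [c] := this
          _ = runM M ((d :: r').filter (fun y => y ≠ c)) ++ [c] := by
              rw [hfil]
              show _ = runM (stepM M d (r'.filter (fun y => y ≠ c))) (r'.filter (fun y => y ≠ c)) ++ [c]
              rw [hstepR]

-- ---- NoDang via indices ----

theorem noDang_of_idx (c : Char) (r : List Char)
    (h : ∀ j k, k < r.length → j < k → r.getD k ' ' = c → c ≤ r.getD j ' ') :
    NoDang c r := by
  induction r with
  | nil => trivial
  | cons d r' ih =>
    refine ⟨fun hc => ?_, ih fun j k hk hjk hkc => ?_⟩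
    · obtain ⟨k, hk, hkc⟩ := List.mem_iff_getElem.mp hc
      have := h 0 (k + 1) (by simpa using hk) (by omega)
        (by rw [getD_cons_succ', List.getD_eq_getElem _ _ hk]; exact hkc)
      simpa using this
    · have := h (j + 1) (k + 1) (by simpa using hk) (by omega)
        (by rwa [getD_cons_succ'])
      simpa [getD_cons_succ'] using this

-- ---- the greedy step is what the stack computes ----

theorem initial_good (t : List Char) (pos : Nat) (c : Char)
    (hpos : pos < t.length) (hc : t.getD pos ' ' = c) (hle : pos ≤ iStar t)
    (hmin2 : ∀ j ≤ iStar t, j < t.length → c ≤ t.getD j ' ') :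
    Vc c [] (t.drop (pos + 1)) := by
  intro hcr
  have htne : t ≠ [] := by rintro rfl; simp at hpos
  have histar := iStar_lt_length t htne
  by_cases hpe : pos = iStar t
  · exfalso
    have := iStar_not_mem t htne
    rw [← hpe, hc] at this
    exact this hcr
  · have hplt : pos < iStar t := lt_of_le_of_ne hle hpe
    right
    by_cases hce : c < t.getD (iStar t) ' '
    · -- split r0 = u ++ e :: v with e = t[iStar]
      right
      refine ⟨(t.drop (pos + 1)).take (iStar t - (pos + 1)), t.getD (iStar t) ' ',
        t.drop (iStar t + 1), ?_, ?_, hce, iStar_not_mem t htne⟩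
      · have h1 : (t.drop (pos + 1)).drop (iStar t - (pos + 1)) = t.drop (iStar t) := by
          rw [List.drop_drop]
          congr 1
          omega
        have h2 : t.drop (iStar t) = t.getD (iStar t) ' ' :: t.drop (iStar t + 1) := by
          rw [List.getD_eq_getElem _ _ histar]
          exact List.drop_eq_getElem_cons histar
        conv_lhs => rw [← List.take_append_drop (iStar t - (pos + 1)) (t.drop (pos + 1))]
        rw [h1, h2]
      · intro x hx
        obtain ⟨j, hj, hjx⟩ := List.mem_iff_getElem.mp hx
        have hj1 : j < iStar t - (pos + 1) := by
          have := hj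
          simp [List.length_take, List.length_drop] at this
          omega
        have hj2 : pos + 1 + j < t.length := by omega
        have hx' : x = t.getD (pos + 1 + j) ' ' := by
          rw [← hjx, List.getElem_take, List.getElem_drop, List.getD_eq_getElem _ _ hj2]
        rw [hx']
        exact hmin2 (pos + 1 + j) (by omega) hj2
    · -- c = t[iStar]: no danger at all
      left
      have hee : c = t.getD (iStar t) ' ' :=
        le_antisymm (hmin2 (iStar t) le_rfl histar) (not_lt.mp hce)
      apply noDang_of_idx
      intro j k hk hjk hkc
      have hklen : pos + 1 + k < t.length := by
        simp [List.length_drop] at hk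
        omega
      rw [getD_drop'] at hkc
      have hkle : pos + 1 + k ≤ iStar t := by
        by_contra hgt
        apply iStar_not_mem t htne
        rw [← hee, ← hkc]
        exact mem_drop_of_getD t (iStar t + 1) (pos + 1 + k) hklen (by omega)
      rw [getD_drop']
      exact hmin2 (pos + 1 + j) (by omega) (by omega)


theorem prefix_collapse (t : List Char) (pos : Nat) (c : Char)
    (hpos : pos < t.length) (hc : t.getD pos ' ' = c) (hle : pos ≤ iStar t)
    (hmin1 : ∀ j < pos, c < t.getD j ' ') :
    runM [] t = runM [c] (t.drop (pos + 1)) := by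
  have hsplit : runM ([] : List Char) t = runM (runP [] (t.take pos) (t.drop pos)) (t.drop pos) := by
    conv_lhs => rw [← List.take_append_drop pos t]
    exact runM_split _ _ _
  have hdropc : t.drop pos = c :: t.drop (pos + 1) := by
    rw [← hc, List.getD_eq_getElem _ _ hpos]
    exact List.drop_eq_getElem_cons hpos
  set S := runP ([] : List Char) (t.take pos) (t.drop pos) with hS
  have hSP : ∀ x ∈ S, c < x ∧ x ∈ t.drop (pos + 1) := by
    intro x hx
    rcases runP_subset _ _ _ x hx with h | h
    · simp at h
    · obtain ⟨j, hj, hjx⟩ := List.mem_iff_getElem.mp h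
      have hj1 : j < pos := by
        have := hj; simp [List.length_take] at this; omega
      have hj2 : j < t.length := by omega
      have hx' : x = t.getD j ' ' := by
        rw [← hjx, List.getElem_take, List.getD_eq_getElem _ _ hj2]
      have hcx : c < x := hx' ▸ hmin1 j hj1
      refine ⟨hcx, ?_⟩
      have hxt : x ∈ t := by
        rw [hx']
        simpa using mem_drop_of_getD t 0 j hj2 (by omega)
      obtain ⟨ℓ, hl1, hl2, hl3⟩ := last_occ_exists t x hxt
      have hil : iStar t ≤ ℓ := iStar_le t ℓ hl1 (by rw [hl2]; exact hl3)
      have hlpos : pos < ℓ := by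
        rcases lt_or_eq_of_le (le_trans hle hil) with h | h
        · exact h
        · exfalso
          rw [← h, hc] at hl2
          exact absurd (hl2 ▸ hcx) (lt_irrefl c)
      rw [← hl2]
      exact mem_drop_of_getD t (pos + 1) ℓ hl1 (by omega)
  have hcS : c ∉ S := fun hh => absurd (hSP c hh).1 (lt_irrefl c)
  have hstep : stepM S c (t.drop (pos + 1)) = [c] := by
    unfold stepM
    rw [if_neg hcS, popM_all S c _ (fun x hx => ⟨le_of_lt (hSP x hx).1, (hSP x hx).2⟩)]
  rw [hsplit, hdropc]
  show runM (stepM S c (t.drop (pos + 1))) (t.drop (pos + 1)) = _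
  rw [hstep]

theorem greedy_step (t : List Char) (pos : Nat) (c : Char)
    (hpos : pos < t.length) (hc : t.getD pos ' ' = c) (hle : pos ≤ iStar t)
    (hmin1 : ∀ j < pos, c < t.getD j ' ')
    (hmin2 : ∀ j ≤ iStar t, j < t.length → c ≤ t.getD j ' ') :
    (runM [] t).reverse =
      c :: (runM [] ((t.drop (pos + 1)).filter (fun y => y ≠ c))).reverse := by
  have h1 := prefix_collapse t pos c hpos hc hle hmin1
  have h2 := runM_protected c (t.drop (pos + 1)) [] (by simp)
    (initial_good t pos c hpos hc hle hmin2)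
  simp only [List.nil_append] at h2
  rw [h1, h2, List.reverse_append]
  rfl

-- ---- characterization of B's selection loop ----

theorem i_le_iStar (cs : List Char) (i : Nat) (hi : i ≤ cs.length) (hne : cs ≠ [])
    (hnb : ∀ j < i, cs.getD j ' ' ∈ cs.drop (j + 1)) : i ≤ iStar cs := by
  by_contra hgt
  exact iStar_not_mem cs hne (hnb (iStar cs) (by omega))

theorem selB_inv (cs : List Char) (hne : cs ≠ []) :
    ∀ (rem : List Char) (i pos : Nat) (count : PySem.Dict Char Int),
    rem = cs.drop i →
    (∀ x, count.getD x 0 = ((cs.drop i).count x : Int)) →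
    pos < cs.length → pos ≤ i →
    (∀ j < pos, cs.getD pos ' ' < cs.getD j ' ') →
    (∀ j < i, cs.getD pos ' ' ≤ cs.getD j ' ') →
    (∀ j < i, cs.getD j ' ' ∈ cs.drop (j + 1)) →
    pvSelB cs rem i count pos < cs.length ∧
      pvSelB cs rem i count pos ≤ iStar cs ∧
      (∀ j < pvSelB cs rem i count pos,
        cs.getD (pvSelB cs rem i count pos) ' ' < cs.getD j ' ') ∧
      (∀ j ≤ iStar cs, j < cs.length →
        cs.getD (pvSelB cs rem i count pos) ' ' ≤ cs.getD j ' ') := by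
  intro rem
  induction rem with
  | nil =>
    intro i pos count hrem hcount hpos hposle hpos2 hpos3 hnb
    exfalso
    have hilen : cs.length ≤ i := by
      by_contra hlt
      have hd : cs.drop i ≠ [] := by
        intro hh
        have := congrArg List.length hh
        simp [List.length_drop] at this
        omega
      exact hd hrem.symm
    have h0 : 0 < cs.length := List.length_pos_iff.mpr hne
    obtain ⟨ℓ, hl1, hl2, hl3⟩ := last_occ_exists cs (cs.getD 0 ' ')
      (by simpa using mem_drop_of_getD cs 0 0 h0 (by omega))
    exact hl3 (hl2 ▸ hnb ℓ (by omega))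
  | cons ch rem' ih =>
    intro i pos count hrem hcount hpos hposle hpos2 hpos3 hnb
    have hilen : i < cs.length := by
      by_contra hge
      rw [List.drop_eq_nil_of_le (by omega)] at hrem
      simp at hrem
    have hdropi : cs.drop i = cs.getD i ' ' :: cs.drop (i + 1) := by
      rw [List.getD_eq_getElem _ _ hilen]
      exact List.drop_eq_getElem_cons hilen
    rw [hdropi] at hrem
    injection hrem with hch1 hch2
    have hcnt1 : (count.insert ch (count.getD ch 0 - 1)).getD ch 0
        = ((cs.drop (i + 1)).count ch : Int) := by
      rw [PySem.Dict.getD_insert_self, hcount ch, hdropi, hch1, List.count_cons_self]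
      push_cast
      ring
    have hp1lt : (if ch < cs.getD pos ' ' then i else pos) < cs.length := by
      split <;> omega
    have hp1le : (if ch < cs.getD pos ' ' then i else pos) ≤ i := by
      split <;> omega
    have hp1min2 : ∀ j < i,
        cs.getD (if ch < cs.getD pos ' ' then i else pos) ' ' ≤ cs.getD j ' ' := by
      intro j hj
      by_cases h : ch < cs.getD pos ' '
      · rw [if_pos h, ← hch1]
        exact le_of_lt (lt_of_lt_of_le h (hpos3 j hj))
      · rw [if_neg h]
        exact hpos3 j hj
    have hp1min1 : ∀ j < (if ch < cs.getD pos ' ' then i else pos),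
        cs.getD (if ch < cs.getD pos ' ' then i else pos) ' ' < cs.getD j ' ' := by
      intro j hj
      by_cases h : ch < cs.getD pos ' '
      · rw [if_pos h] at hj ⊢
        rw [← hch1]
        exact lt_of_lt_of_le h (hpos3 j hj)
      · rw [if_neg h] at hj ⊢
        exact hpos2 j hj
    have hp1i : cs.getD (if ch < cs.getD pos ' ' then i else pos) ' ' ≤ ch := by
      by_cases h : ch < cs.getD pos ' '
      · rw [if_pos h, ← hch1]
      · rw [if_neg h]
        exact not_lt.mp h
    by_cases hz : (count.insert ch (count.getD ch 0 - 1)).getD ch 0 = 0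
    · have heq : pvSelB cs (ch :: rem') i count pos
          = (if ch < cs.getD pos ' ' then i else pos) := by
        simp only [pvSelB]
        rw [if_pos (beq_iff_eq.mpr hz)]
      have hnotmem : cs.getD i ' ' ∉ cs.drop (i + 1) := by
        rw [← hch1]
        have h1 : ((cs.drop (i + 1)).count ch : Int) = 0 := by rw [← hcnt1]; exact hz
        have hn : (cs.drop (i + 1)).count ch = 0 := by exact_mod_cast h1
        exact List.count_eq_zero.mp hn
      have hieq : i = iStar cs :=
        le_antisymm (i_le_iStar cs i (le_of_lt hilen) hne hnb)
          (iStar_le cs i hilen hnotmem)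
      rw [heq]
      refine ⟨hp1lt, hieq ▸ hp1le, hp1min1, ?_⟩
      intro j hj hjlen
      rw [← hieq] at hj
      rcases lt_or_eq_of_le hj with h | h
      · exact hp1min2 j h
      · rw [h, ← hch1]
        exact hp1i
    · have heq : pvSelB cs (ch :: rem') i count pos
          = pvSelB cs rem' (i + 1) (count.insert ch (count.getD ch 0 - 1))
              (if ch < cs.getD pos ' ' then i else pos) := by
        simp only [pvSelB]
        rw [if_neg (by simpa using hz)]
      rw [heq]
      apply ih (i + 1) _ _ hch2
      · intro x
        by_cases hx : x = ch
        · rw [hx]; exact hcnt1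
        · rw [PySem.Dict.getD_insert, if_neg hx, hcount x, hdropi,
            List.count_cons_of_ne (by rw [← hch1]; exact fun hh => hx hh.symm)]
      · exact hp1lt
      · omega
      · exact hp1min1
      · intro j hj
        rcases lt_or_eq_of_le (Nat.lt_succ_iff.mp hj) with h | h
        · exact hp1min2 j h
        · rw [h, ← hch1]
          exact hp1i
      · intro j hj
        rcases lt_or_eq_of_le (Nat.lt_succ_iff.mp hj) with h | h
        · exact hnb j h
        · rw [h]
          by_contra hmem
          apply hz
          rw [hcnt1, List.count_eq_zero.mpr (show ch ∉ cs.drop (i + 1) by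
            rw [hch1]; exact hmem)]
          rfl

theorem sel_spec (cs : List Char) (h : cs ≠ []) :
    pvSelB cs cs 0 (pvCountB cs) 0 < cs.length ∧
      pvSelB cs cs 0 (pvCountB cs) 0 ≤ iStar cs ∧
      (∀ j < pvSelB cs cs 0 (pvCountB cs) 0,
        cs.getD (pvSelB cs cs 0 (pvCountB cs) 0) ' ' < cs.getD j ' ') ∧
      (∀ j ≤ iStar cs, j < cs.length →
        cs.getD (pvSelB cs cs 0 (pvCountB cs) 0) ' ' ≤ cs.getD j ' ') := by
  apply selB_inv cs h cs 0 0 (pvCountB cs) (by simp)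
  · intro x
    unfold pvCountB
    rw [PySem.Dict.getD_foldl_insert_add_one]
    simp
  · exact List.length_pos_iff.mpr h
  · omega
  · intro j hj; exact absurd hj (by omega)
  · intro j hj; exact absurd hj (by omega)
  · intro j hj; exact absurd hj (by omega)

-- ---- model ↔ port B ----

theorem model_eq_pvGoB_aux : ∀ (n : Nat) (t : List Char), t.length ≤ n →
    (runM [] t).reverse = pvGoB t := by
  intro n
  induction n with
  | zero =>
    intro t ht
    have : t = [] := List.length_eq_zero_iff.mp (by omega)
    subst this
    simp [runM, pvGoB]
  | succ n ih =>
    intro t ht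
    match t with
    | [] => simp [runM, pvGoB]
    | c0 :: cs' =>
      have hne : (c0 :: cs') ≠ [] := List.cons_ne_nil _ _
      obtain ⟨h1, h2, h3, h4⟩ := sel_spec (c0 :: cs') hne
      have hgo : pvGoB (c0 :: cs') =
          (c0 :: cs').getD (pvSelB (c0 :: cs') (c0 :: cs') 0 (pvCountB (c0 :: cs')) 0) ' ' ::
            pvGoB (((c0 :: cs').drop (pvSelB (c0 :: cs') (c0 :: cs') 0 (pvCountB (c0 :: cs')) 0 + 1)).filter
              (fun x => x ≠ (c0 :: cs').getD (pvSelB (c0 :: cs') (c0 :: cs') 0 (pvCountB (c0 :: cs')) 0) ' ')) := by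
        simp only [pvGoB]
      rw [greedy_step (c0 :: cs') _ _ h1 rfl h2 h3 h4, hgo]
      congr 1
      apply ih
      have hf := List.length_filter_le
        (fun x => x ≠ (c0 :: cs').getD (pvSelB (c0 :: cs') (c0 :: cs') 0 (pvCountB (c0 :: cs')) 0) ' ')
        ((c0 :: cs').drop (pvSelB (c0 :: cs') (c0 :: cs') 0 (pvCountB (c0 :: cs')) 0 + 1))
      simp only [List.length_drop, List.length_cons] at hf ht ⊢
      omega

theorem model_eq_pvGoB (t : List Char) : (runM [] t).reverse = pvGoB t :=
  model_eq_pvGoB_aux t.length t le_rfl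

-- ---- port A ↔ model ----

theorem mem_drop_iff (cs : List Char) (x : Char) (m : Nat) :
    x ∈ cs.drop m ↔ ∃ k, m ≤ k ∧ k < cs.length ∧ cs.getD k ' ' = x := by
  constructor
  · intro hx
    obtain ⟨j, hj, hjx⟩ := List.mem_iff_getElem.mp hx
    have hj1 : m + j < cs.length := by
      have := hj; simp [List.length_drop] at this; omega
    refine ⟨m + j, by omega, hj1, ?_⟩
    rw [← hjx, List.getElem_drop, List.getD_eq_getElem _ _ hj1]
  · rintro ⟨k, hk1, hk2, rfl⟩
    exact mem_drop_of_getD cs m k hk2 hk1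

-- the lastOccurence dict: get? x is the last index of x among the first n characters
theorem lastOccA_aux (cs : List Char) : ∀ n, n ≤ cs.length → ∀ x,
    (x ∈ cs.take n → ∃ ℓ, ℓ < n ∧ cs.getD ℓ ' ' = x ∧
      (∀ k, ℓ < k → k < n → cs.getD k ' ' ≠ x) ∧
      ((List.range n).foldl (fun d i => d.insert (cs.getD i ' ') i)
        PySem.Dict.empty).get? x = some ℓ) ∧
    (x ∉ cs.take n → ((List.range n).foldl (fun d i => d.insert (cs.getD i ' ') i)
        PySem.Dict.empty).get? x = none) := by
  intro n
  induction n with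
  | zero =>
    intro _ x
    exact ⟨fun hx => by simp at hx, fun _ => by simp [PySem.Dict.get?_empty]⟩
  | succ n ih =>
    intro hn x
    have hnl : n < cs.length := by omega
    have hfold : ((List.range (n + 1)).foldl (fun d i => d.insert (cs.getD i ' ') i)
        PySem.Dict.empty)
        = ((List.range n).foldl (fun d i => d.insert (cs.getD i ' ') i)
            PySem.Dict.empty).insert (cs.getD n ' ') n := by
      rw [List.range_succ, List.foldl_append]
      rfl
    have htake : cs.take (n + 1) = cs.take n ++ [cs.getD n ' '] := by
      rw [List.getD_eq_getElem _ _ hnl]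
      rw [List.take_succ, List.getElem?_eq_getElem hnl]
      rfl
    constructor
    · intro hx
      by_cases hxe : x = cs.getD n ' '
      · refine ⟨n, by omega, hxe.symm, by intro k h1 h2; omega, ?_⟩
        rw [hfold, hxe, PySem.Dict.get?_insert_self]
      · have hx' : x ∈ cs.take n := by
          rw [htake] at hx
          rcases List.mem_append.mp hx with h | h
          · exact h
          · exact absurd (List.mem_singleton.mp h) hxe
        obtain ⟨ℓ, hl1, hl2, hl3, hl4⟩ := (ih (by omega) x).1 hx'
        refine ⟨ℓ, by omega, hl2, ?_, ?_⟩
        · intro k h1 h2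
          rcases Nat.lt_succ_iff_lt_or_eq.mp h2 with h | h
          · exact hl3 k h1 h
          · rw [h]; exact fun hh => hxe hh.symm
        · rw [hfold, PySem.Dict.get?_insert_of_ne _ _ hxe, hl4]
    · intro hx
      have hx1 : x ∉ cs.take n := fun hh => hx (by rw [htake]; exact List.mem_append_left _ hh)
      have hx2 : x ≠ cs.getD n ' ' := fun hh =>
        hx (by rw [htake, hh]; exact List.mem_append_right _ (List.mem_singleton.mpr rfl))
      rw [hfold, PySem.Dict.get?_insert_of_ne _ _ hx2]
      exact (ih (by omega) x).2 hx1

-- for a character of cs:  i < lastOccurence[x]  ⟺  x still occurs after index i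
theorem lastOcc_iff (cs : List Char) (x : Char) (hx : x ∈ cs) (i : Nat) :
    (i < (pvLastOccA cs).getD x 0) ↔ x ∈ cs.drop (i + 1) := by
  have hx' : x ∈ cs.take cs.length := by rwa [List.take_length]
  obtain ⟨ℓ, hl1, hl2, hl3, hl4⟩ := (lastOccA_aux cs cs.length le_rfl x).1 hx'
  have hget : (pvLastOccA cs).getD x 0 = ℓ := by
    unfold pvLastOccA
    rw [PySem.Dict.getD_eq_get?_getD, hl4]
    rfl
  rw [hget]
  constructor
  · intro hi
    rw [← hl2]
    exact mem_drop_of_getD cs (i + 1) ℓ hl1 (by omega)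
  · intro hmem
    obtain ⟨k, hk1, hk2, hk3⟩ := (mem_drop_iff cs x (i + 1)).mp hmem
    by_contra hle
    exact hl3 k (by omega) hk2 hk3

theorem popA_bridge (cs : List Char) (c : Char) (i : Nat) :
    ∀ (stk : List (Char × Nat)) (seen : PySem.Set Char),
    (∀ y, y ∈ seen ↔ y ∈ stk.map Prod.fst) →
    (stk.map Prod.fst).Nodup →
    (∀ p ∈ stk, p.1 ∈ cs) →
    (pvPopA seen stk c i (pvLastOccA cs)).2.map Prod.fst
        = popM (stk.map Prod.fst) c (cs.drop (i + 1)) ∧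
      (∀ y, y ∈ (pvPopA seen stk c i (pvLastOccA cs)).1 ↔
        y ∈ (pvPopA seen stk c i (pvLastOccA cs)).2.map Prod.fst) ∧
      ((pvPopA seen stk c i (pvLastOccA cs)).2.map Prod.fst).Nodup ∧
      (∀ p ∈ (pvPopA seen stk c i (pvLastOccA cs)).2, p.1 ∈ cs) := by
  intro stk
  induction stk with
  | nil =>
    intro seen hmap hnd hmem
    refine ⟨rfl, ?_, by simp [pvPopA], by simp [pvPopA]⟩
    intro y
    simpa [pvPopA] using hmap y
  | cons p rest ih =>
    intro seen hmap hnd hmem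
    obtain ⟨x, j⟩ := p
    have hxcs : x ∈ cs := hmem (x, j) (List.mem_cons_self ..)
    have hiff := lastOcc_iff cs x hxcs i
    by_cases hcx : c ≤ x
    · by_cases hlast : i < (pvLastOccA cs).getD x 0
      · -- pop
        have hcond : c ≤ x ∧ x ∈ cs.drop (i + 1) := ⟨hcx, hiff.mp hlast⟩
        have hxseen : x ∈ seen := (hmap x).mpr (by simp)
        have heq : pvPopA seen ((x, j) :: rest) c i (pvLastOccA cs)
            = pvPopA (PySem.Set.discard seen x) rest c i (pvLastOccA cs) := by
          simp only [pvPopA]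
          rw [if_pos hcx, if_pos hlast, if_pos hxseen]
        have hxrest : x ∉ rest.map Prod.fst := by
          have := hnd
          simp only [List.map_cons, List.nodup_cons] at this
          exact this.1
        have hmap' : ∀ y, y ∈ PySem.Set.discard seen x ↔ y ∈ rest.map Prod.fst := by
          intro y
          rw [PySem.Set.mem_discard]
          constructor
          · rintro ⟨h1, h2⟩
            have hmem' := (hmap y).mp h1
            rw [List.map_cons, List.mem_cons] at hmem'
            rcases hmem' with h | h
            · exact absurd h h2
            · exact h
          · intro hy
            refine ⟨(hmap y).mpr (by simp [hy]), ?_⟩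
            rintro rfl
            exact hxrest hy
        have hmodel : popM (((x, j) :: rest).map Prod.fst) c (cs.drop (i + 1))
            = popM (rest.map Prod.fst) c (cs.drop (i + 1)) := by
          simp only [List.map_cons, popM]
          rw [if_pos hcond]
        rw [heq, hmodel]
        exact ih (PySem.Set.discard seen x)  hmap'
          (by simpa using hnd.of_cons) (fun q hq => hmem q (List.mem_cons_of_mem _ hq))
      · have heq : pvPopA seen ((x, j) :: rest) c i (pvLastOccA cs)
            = (seen, (x, j) :: rest) := by
          simp only [pvPopA]
          rw [if_pos hcx, if_neg hlast]
        have hmodel : popM (((x, j) :: rest).map Prod.fst) c (cs.drop (i + 1))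
            = ((x, j) :: rest).map Prod.fst := by
          simp only [List.map_cons, popM]
          rw [if_neg (fun hh => hlast (hiff.mpr hh.2))]
        rw [heq, hmodel]
        exact ⟨rfl, hmap, hnd, hmem⟩
    · have heq : pvPopA seen ((x, j) :: rest) c i (pvLastOccA cs)
          = (seen, (x, j) :: rest) := by
        simp only [pvPopA]
        rw [if_neg hcx]
      have hmodel : popM (((x, j) :: rest).map Prod.fst) c (cs.drop (i + 1))
          = ((x, j) :: rest).map Prod.fst := by
        simp only [List.map_cons, popM]
        rw [if_neg (fun hh => hcx hh.1)]
      rw [heq, hmodel]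
      exact ⟨rfl, hmap, hnd, hmem⟩

theorem loopA_bridge (cs : List Char) : ∀ (k i : Nat) (seen : PySem.Set Char)
    (stk : List (Char × Nat)), i + k = cs.length →
    (∀ y, y ∈ seen ↔ y ∈ stk.map Prod.fst) →
    (stk.map Prod.fst).Nodup →
    (∀ p ∈ stk, p.1 ∈ cs) →
    (pvLoopA cs (pvLastOccA cs) (List.range' i k) (seen, stk)).2.map Prod.fst
      = runM (stk.map Prod.fst) (cs.drop i) := by
  intro k
  induction k with
  | zero =>
    intro i seen stk hik hmap hnd hmem
    rw [List.drop_eq_nil_of_le (by omega)]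
    rfl
  | succ k ih =>
    intro i seen stk hik hmap hnd hmem
    have hilen : i < cs.length := by omega
    have hdropi : cs.drop i = cs.getD i ' ' :: cs.drop (i + 1) := by
      rw [List.getD_eq_getElem _ _ hilen]
      exact List.drop_eq_getElem_cons hilen
    rw [List.range'_succ, hdropi]
    show (pvLoopA cs (pvLastOccA cs) (i :: List.range' (i + 1) k) (seen, stk)).2.map Prod.fst
      = runM (stepM (stk.map Prod.fst) (cs.getD i ' ') (cs.drop (i + 1))) (cs.drop (i + 1))
    by_cases hseen : cs.getD i ' ' ∈ seen
    · have heq : pvLoopA cs (pvLastOccA cs) (i :: List.range' (i + 1) k) (seen, stk)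
          = pvLoopA cs (pvLastOccA cs) (List.range' (i + 1) k) (seen, stk) := by
        simp only [pvLoopA]
        rw [if_pos hseen]
      have hstep : stepM (stk.map Prod.fst) (cs.getD i ' ') (cs.drop (i + 1))
          = stk.map Prod.fst := by
        unfold stepM
        rw [if_pos ((hmap _).mp hseen)]
      rw [heq, hstep]
      exact ih (i + 1) seen stk (by omega) hmap hnd hmem
    · obtain ⟨hb1, hb2, hb3, hb4⟩ := popA_bridge cs (cs.getD i ' ') i stk seen hmap hnd hmem
      have hnotstk : cs.getD i ' ' ∉ stk.map Prod.fst := fun hh => hseen ((hmap _).mpr hh)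
      have hnot1 : cs.getD i ' ' ∉ (pvPopA seen stk (cs.getD i ' ') i (pvLastOccA cs)).1 := by
        intro hh
        exact hnotstk (popM_subset _ _ _ _ (hb1 ▸ (hb2 _).mp hh))
      have heq : pvLoopA cs (pvLastOccA cs) (i :: List.range' (i + 1) k) (seen, stk)
          = pvLoopA cs (pvLastOccA cs) (List.range' (i + 1) k)
              (PySem.Set.add (pvPopA seen stk (cs.getD i ' ') i (pvLastOccA cs)).1 (cs.getD i ' '),
                (cs.getD i ' ', i) :: (pvPopA seen stk (cs.getD i ' ') i (pvLastOccA cs)).2) := by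
        simp only [pvLoopA]
        rw [if_neg hseen, if_neg hnot1]
      have hstep : stepM (stk.map Prod.fst) (cs.getD i ' ') (cs.drop (i + 1))
          = cs.getD i ' ' :: popM (stk.map Prod.fst) (cs.getD i ' ') (cs.drop (i + 1)) := by
        unfold stepM
        rw [if_neg hnotstk]
      rw [heq]
      have hpush :
          ((cs.getD i ' ', i) :: (pvPopA seen stk (cs.getD i ' ') i (pvLastOccA cs)).2).map Prod.fst
            = cs.getD i ' ' :: (pvPopA seen stk (cs.getD i ' ') i (pvLastOccA cs)).2.map Prod.fst := rfl
      have hnotpop : cs.getD i ' ' ∉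
          (pvPopA seen stk (cs.getD i ' ') i (pvLastOccA cs)).2.map Prod.fst := by
        intro hh
        exact hnotstk (popM_subset _ _ _ _ (hb1 ▸ hh))
      have := ih (i + 1)
        (PySem.Set.add (pvPopA seen stk (cs.getD i ' ') i (pvLastOccA cs)).1 (cs.getD i ' '))
        ((cs.getD i ' ', i) :: (pvPopA seen stk (cs.getD i ' ') i (pvLastOccA cs)).2)
        (by omega)
        (by
          intro y
          rw [PySem.Set.mem_add, hpush]
          constructor
          · rintro (h | h)
            · exact List.mem_cons_of_mem _ ((hb2 y).mp h)
            · simp [h]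
          · intro h
            rw [List.mem_cons] at h
            rcases h with h | h
            · exact Or.inr h
            · exact Or.inl ((hb2 y).mpr h))
        (by rw [hpush]; exact List.nodup_cons.mpr ⟨hnotpop, hb3⟩)
        (by
          intro p hp
          rw [List.mem_cons] at hp
          rcases hp with rfl | hp
          · simpa using mem_drop_of_getD cs 0 i hilen (by omega)
          · exact hb4 p hp)
      rw [this, hpush, hb1, hstep]

theorem resA_eq (stk : List (Char × Nat)) : ∀ acc,
    pvResA stk acc = acc ++ stk.map Prod.fst := by
  induction stk with
  | nil => intro acc; simp [pvResA]
  | cons p rest ih =>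
    intro acc
    obtain ⟨x, j⟩ := p
    rw [pvResA, ih]
    simp

theorem portA_eq_model (s : String) :
    monotonicStack s = String.ofList ((runM [] s.toList).reverse) := by
  have hloop := loopA_bridge s.toList s.toList.length 0 PySem.Set.empty []
    (by omega) (by simp [PySem.Set.empty]) (by simp) (by simp)
  show String.ofList (pvResA (pvLoopA s.toList (pvLastOccA s.toList)
      (List.range s.toList.length) (PySem.Set.empty, [])).2 []).reverse = _
  rw [List.range_eq_range', resA_eq, List.nil_append, hloop]
  simp

-- ===== VERDICT (by name: the statement is the Claim_ definition above) =====
theorem monotonicStack_spec : Claim_equal_monotonicStack := by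
  intro s _
  unfold Spec_monotonicStack monotonicStack_alt
  rw [portA_eq_model, model_eq_pvGoB]
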